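-- pv_equiv track=rewrite | github.com/aepaysinger/code-challenges | code_challenges/code_wars/almost_even.py | split_integer
-- ===== SOURCE A (Python) =====
-- def split_integer(num, parts):
--     integer_parts = []
--     part = num // parts
--     for _ in range(parts):
--         integer_parts.append(part)
--     i = len(integer_parts) - 1
--     for _ in range((num % parts)):
--         integer_parts[i] += 1
--         i -= 1
--     return integer_parts
-- ===== SOURCE B (Python) =====
-- def split_integer(num, parts):
--     out = []
--     while parts > 0:
--         first = num // parts
--         out.append(first)
--         num -= first
--         parts -= 1
--     return out
-- ===== Notes on version B (the rewrite author's own statement) =====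
-- stated objective: alternative
-- what changed: Replaces A's fill-then-backward-increment remainder distribution with a greedy peeling loop that repeatedly takes floor(num/parts_left) as the next part and subtracts it, never computing the remainder at all.
import Mathlib
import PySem

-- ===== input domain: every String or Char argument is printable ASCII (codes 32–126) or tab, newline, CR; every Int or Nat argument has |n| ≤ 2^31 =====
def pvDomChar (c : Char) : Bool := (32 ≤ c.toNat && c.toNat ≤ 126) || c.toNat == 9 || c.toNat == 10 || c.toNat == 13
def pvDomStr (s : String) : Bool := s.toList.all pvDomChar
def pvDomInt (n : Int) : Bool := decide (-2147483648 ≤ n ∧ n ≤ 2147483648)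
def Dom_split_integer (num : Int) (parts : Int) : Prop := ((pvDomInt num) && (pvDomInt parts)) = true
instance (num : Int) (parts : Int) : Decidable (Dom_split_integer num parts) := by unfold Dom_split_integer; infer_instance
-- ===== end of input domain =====

-- B replaces A's fill-then-backward-increment scheme with a greedy peeling loop
-- (next part = floor(num/parts_left), subtract, repeat) — an alternative algorithm, same cost.


-- ===== PORT A =====
-- integer_parts[i] += 1 (i is always a valid non-negative index when reached, see proof);
-- pySetD/pyGetD are Python-exact for in-range i.
def pvIncAt (l : List Int) (i : Int) : List Int :=
  PySem.List.pySetD l i (PySem.List.pyGetD l i 0 + 1)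

def split_integer (num : Int) (parts : Int) : List Int :=
  let part := PySem.Int.floordiv num parts
  let integer_parts :=
    (PySem.List.pyRange 0 parts 1).foldl (fun acc _ => acc ++ [part]) []
  let st :=
    (PySem.List.pyRange 0 (PySem.Int.mod num parts) 1).foldl
      (fun (st : List Int × Int) _ => (pvIncAt st.1 st.2, st.2 - 1))
      (integer_parts, (integer_parts.length : Int) - 1)
  st.1

-- ===== PORT B =====
-- B's while loop, state (num, parts, out); decreases on parts.toNat.
def pvPeel (num : Int) (parts : Int) (out : List Int) : List Int :=
  if h : 0 < parts then
    let first := PySem.Int.floordiv num parts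
    pvPeel (num - first) (parts - 1) (out ++ [first])
  else out
termination_by parts.toNat
decreasing_by omega

def split_integer_alt (num : Int) (parts : Int) : List Int :=
  pvPeel num parts []

-- ===== PRECONDITION & SPEC =====
-- parts = 0 makes Python A raise ZeroDivisionError
def Pre_split_integer (num : Int) (parts : Int) : Prop := parts ≠ 0
instance (num : Int) (parts : Int) : Decidable (Pre_split_integer num parts) := by
  unfold Pre_split_integer; infer_instance

def pvWitness_split_integer : Int × Int := (10, 3)

def Spec_split_integer (num : Int) (parts : Int) (out : List Int) : Prop := out = split_integer_alt num parts
instance (num : Int) (parts : Int) (out : List Int) : Decidable (Spec_split_integer num parts out) := by unfold Spec_split_integer; infer_instance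

-- ===== CLAIM (what is proved, stated in full; the proofs are below) =====
def Claim_equal_split_integer : Prop := ∀ (num : Int) (parts : Int), Dom_split_integer num parts → Pre_split_integer num parts → Spec_split_integer num parts (split_integer num parts)

-- ===== LEMMAS AND PROOFS =====

-- common closed form both ports are reduced to
def pvClosed (num : Int) (parts : Int) : List Int :=
  let base := PySem.Int.floordiv num parts
  let r := PySem.Int.mod num parts
  List.replicate (parts - r).toNat base ++ List.replicate r.toNat (base + 1)

-- A's first loop builds a replicated list
theorem pvFill (xs : List Int) (p : Int) (acc : List Int) :
    xs.foldl (fun acc _ => acc ++ [p]) acc = acc ++ List.replicate xs.length p := by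
  induction xs generalizing acc with
  | nil => simp
  | cons x t ih => simp [List.foldl_cons, ih, List.replicate_succ]

theorem pvRangeLen (m : Int) : (PySem.List.pyRange 0 m 1).length = m.toNat := by
  simp only [PySem.List.pyRange, one_ne_zero, ↓reduceIte, zero_lt_one, add_sub_cancel_right,
    EuclideanDomain.div_one, List.length_map, List.length_range]
  split_ifs with h <;> omega

-- recursion form of A's second loop
def pvLoop2 : Nat → List Int → Int → List Int
  | 0, l, _ => l
  | n + 1, l, i => pvLoop2 n (pvIncAt l i) (i - 1)

theorem pvFoldLoop2 (xs : List Int) (l : List Int) (i : Int) :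
    (xs.foldl (fun (st : List Int × Int) _ => (pvIncAt st.1 st.2, st.2 - 1)) (l, i)).1
      = pvLoop2 xs.length l i := by
  induction xs generalizing l i with
  | nil => rfl
  | cons x t ih => simp [List.foldl_cons, pvLoop2, ih]

theorem pvIncAt_mid (a : Nat) (p : Int) (suf : List Int) :
    pvIncAt (List.replicate (a + 1) p ++ suf) (a : Int) = List.replicate a p ++ (p + 1) :: suf := by
  unfold pvIncAt
  rw [PySem.List.pySetD_natCast, PySem.List.pyGetD_natCast]
  have hg : (List.replicate (a + 1) p ++ suf).getD a 0 = p := by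
    rw [List.getD_eq_getElem?_getD, List.getElem?_append_left (by simp)]
    simp
  rw [hg]
  have hsplit : List.replicate (a + 1) p ++ suf = List.replicate a p ++ p :: suf := by
    rw [List.replicate_succ', List.append_assoc]; rfl
  rw [hsplit]
  simp only [List.length_replicate, Std.le_refl, List.set_append_right, tsub_self,
    List.set_cons_zero]

theorem pvLoop2_main (n : Nat) (a : Nat) (p : Int) (suf : List Int) :
    pvLoop2 n (List.replicate (a + n) p ++ suf) ((a : Int) + n - 1)
      = List.replicate a p ++ List.replicate n (p + 1) ++ suf := by
  induction n generalizing suf with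
  | zero => simp [pvLoop2]
  | succ n ih =>
    have e1 : a + (n + 1) = (a + n) + 1 := by omega
    rw [pvLoop2, e1]
    have e2 : (a : Int) + ((n + 1 : Nat) : Int) - 1 = ((a + n : Nat) : Int) := by push_cast; ring
    rw [e2, pvIncAt_mid (a + n) p suf]
    have e3 : List.replicate (a + n) p ++ (p + 1) :: suf
        = List.replicate (a + n) p ++ ((p + 1) :: suf) := rfl
    have e4 : ((a + n : Nat) : Int) - 1 = (a : Int) + n - 1 := by push_cast; ring
    rw [e3, e4, ih ((p + 1) :: suf)]
    simp [List.replicate_succ']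

-- A reduces to the closed form (for parts ≠ 0)
theorem pvA_closed (num parts : Int) (hp : parts ≠ 0) :
    split_integer num parts = pvClosed num parts := by
  unfold split_integer pvClosed
  simp only [pvFill, List.nil_append, pvFoldLoop2, pvRangeLen, List.length_replicate]
  rcases lt_or_gt_of_ne hp with hneg | hpos
  · have hb := PySem.Int.mod_neg_bounds (a := num) hneg
    have h1 : (PySem.Int.mod num parts).toNat = 0 := by omega
    have h2 : parts.toNat = 0 := by omega
    have h3 : (parts - PySem.Int.mod num parts).toNat = 0 := by omega
    simp [h1, h2, h3, pvLoop2]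
  · have hr0 : 0 ≤ PySem.Int.mod num parts := PySem.Int.mod_nonneg (a := num) hpos
    have hrlt : PySem.Int.mod num parts < parts := PySem.Int.mod_lt (a := num) hpos
    set p := PySem.Int.floordiv num parts with hpdef
    set r := PySem.Int.mod num parts with hrdef
    have hsum : (parts - r).toNat + r.toNat = parts.toNat := by omega
    rw [← hsum]
    have hidx : (((parts - r).toNat + r.toNat : Nat) : Int) - 1
        = ((parts - r).toNat : Int) + (r.toNat : Int) - 1 := by push_cast; ring
    rw [hidx]
    have := pvLoop2_main r.toNat (parts - r).toNat p []
    simpa using this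

-- B reduces to the closed form (for 0 < parts), by induction on parts
theorem pvPeel_closed (n : Nat) : ∀ (num : Int) (out : List Int),
    pvPeel num ((n : Int) + 1) out = out ++ pvClosed num ((n : Int) + 1) := by
  induction n with
  | zero =>
    intro num out
    rw [pvPeel]
    simp [pvClosed, pvPeel]
  | succ n ih =>
    intro num out
    have hc : ((n + 1 : Nat) : Int) = (n : Int) + 1 := by push_cast; ring
    rw [hc, pvPeel]
    have hpos : (0 : Int) < (n : Int) + 1 + 1 := by positivity
    rw [dif_pos hpos]
    set P : Int := (n : Int) + 1 + 1 with hP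
    set b := PySem.Int.floordiv num P with hb
    set r := PySem.Int.mod num P with hr
    have heq : b * P + r = num := PySem.Int.floordiv_mul_add_mod num P
    have hr0 : 0 ≤ r := PySem.Int.mod_nonneg (a := num) (by omega)
    have hrlt : r < P := PySem.Int.mod_lt (a := num) (by omega)
    have hstep : ((n : Int) + 1 + 1) - 1 = (n : Int) + 1 := by ring
    rw [hstep, ih (num - b) (out ++ [b])]
    -- characterise floordiv/mod of (num - b) by (P - 1) = n+1
    have hP1 : (0 : Int) < (n : Int) + 1 := by positivity
    by_cases hcase : r < P - 1
    · have hd' : PySem.Int.floordiv (num - b) ((n : Int) + 1) = b := by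
        rw [PySem.Int.floordiv_eq_iff_of_pos hP1]
        constructor <;> nlinarith [heq]
      have hm' : PySem.Int.mod (num - b) ((n : Int) + 1) = r := by
        have h2 := PySem.Int.floordiv_mul_add_mod (num - b) ((n : Int) + 1)
        rw [hd'] at h2; nlinarith [h2, heq]
      simp only [pvClosed, hd', hm', ← hb, ← hr]
      have h3 : ((n : Int) + 1 - r).toNat + 1 = (P - r).toNat := by omega
      rw [← h3, List.replicate_succ]; simp
    · have hre : r = P - 1 := by omega
      have hd' : PySem.Int.floordiv (num - b) ((n : Int) + 1) = b + 1 := by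
        rw [PySem.Int.floordiv_eq_iff_of_pos hP1]
        constructor <;> nlinarith [heq, hre]
      have hm' : PySem.Int.mod (num - b) ((n : Int) + 1) = 0 := by
        have h2 := PySem.Int.floordiv_mul_add_mod (num - b) ((n : Int) + 1)
        rw [hd'] at h2; nlinarith [h2, heq, hre]
      simp only [pvClosed, hd', hm', ← hb, ← hr]
      have h3 : ((n : Int) + 1 - 0).toNat = ((n : Int) + 1).toNat := by omega
      have h4 : (P - r).toNat = 1 := by omega
      have h5 : r.toNat = ((n : Int) + 1).toNat := by omega
      simp [h3, h4, h5, List.append_assoc]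

theorem pvB_closed (num parts : Int) (hp : 0 < parts) :
    split_integer_alt num parts = pvClosed num parts := by
  unfold split_integer_alt
  obtain ⟨n, hn⟩ : ∃ n : Nat, parts = (n : Int) + 1 :=
    ⟨(parts - 1).toNat, by omega⟩
  rw [hn]
  simpa using pvPeel_closed n num []

-- ===== VERDICT (by name: the statement is the Claim_ definition above) =====
theorem split_integer_spec : Claim_equal_split_integer := by
  intro num parts _ hp
  unfold Spec_split_integer
  rcases lt_or_gt_of_ne hp with hneg | hpos
  · -- parts < 0: A's loops are empty; B's loop never runs
    have hA := pvA_closed num parts hp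
    have hb := PySem.Int.mod_neg_bounds (a := num) hneg
    have h1 : (PySem.Int.mod num parts).toNat = 0 := by omega
    have h3 : (parts - PySem.Int.mod num parts).toNat = 0 := by omega
    rw [hA]
    unfold pvClosed split_integer_alt
    rw [pvPeel]
    simp [h1, h3, not_lt.mpr (le_of_lt hneg)]
  · rw [pvA_closed num parts hp, pvB_closed num parts hpos]
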